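-- pv_equiv track=rewrite | github.com/orenvlad-ai/wb-core | packages/application/simple_xlsx.py | _trim_empty_rows
-- ===== SOURCE A (Python) =====
-- from typing import Any
--
-- def _trim_empty_rows(rows: list[list[Any]]) -> list[list[Any]]:
--     trimmed: list[list[Any]] = []
--     last_nonempty_index = -1
--     for index, row in enumerate(rows):
--         normalized = list(row)
--         while normalized and normalized[-1] in ("", None):
--             normalized.pop()
--         trimmed.append(normalized)
--         if any(value not in ("", None) for value in normalized):
--             last_nonempty_index = index
--     if last_nonempty_index < 0:
--         return []
--     return trimmed[: last_nonempty_index + 1]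
-- ===== SOURCE B (Python) =====
-- def _blank(v):
--     return v == "" or v is None
--
-- def _trim_empty_rows(rows):
--     # Reverse scan: find the cut point past the last row holding a non-blank cell,
--     # then trim only the kept rows by dropping the blank prefix of each reversed row.
--     cut = len(rows)
--     while cut > 0 and all(_blank(v) for v in rows[cut - 1]):
--         cut -= 1
--     out = []
--     for row in rows[:cut]:
--         rev = list(row)[::-1]
--         k = 0
--         while k < len(rev) and _blank(rev[k]):
--             k += 1
--         out.append(rev[k:][::-1])
--     return out
-- ===== Notes on version B (the rewrite author's own statement) =====
-- stated objective: simpler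
-- what changed: Replaces A's single enumerate loop with while/pop row trimming, last_nonempty_index tracking and a final slice by a reverse scan that finds the cut point past the last non-blank row and then trims only the kept rows by dropping the blank prefix of each reversed row.
import Mathlib
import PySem

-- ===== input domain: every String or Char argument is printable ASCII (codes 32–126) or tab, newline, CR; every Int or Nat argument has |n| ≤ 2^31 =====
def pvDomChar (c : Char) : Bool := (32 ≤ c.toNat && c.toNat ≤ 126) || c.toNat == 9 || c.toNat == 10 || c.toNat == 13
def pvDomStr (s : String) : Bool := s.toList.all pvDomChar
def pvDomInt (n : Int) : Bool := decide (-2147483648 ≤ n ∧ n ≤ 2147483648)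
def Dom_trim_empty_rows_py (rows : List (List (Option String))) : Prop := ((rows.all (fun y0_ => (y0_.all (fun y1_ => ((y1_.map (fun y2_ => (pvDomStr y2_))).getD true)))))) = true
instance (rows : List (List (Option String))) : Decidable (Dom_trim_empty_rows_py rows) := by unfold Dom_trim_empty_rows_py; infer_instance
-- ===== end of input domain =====

-- B replaces A's single loop (per-row while/pop trimming + last_nonempty_index tracking + final
-- slice) by a reverse scan for the cut point and reverse/drop-prefix row trimming: simpler, same cost.


-- ===== PORT A =====
-- `value in ("", None)` for a cell of type Option String
def isEmptyCell (c : Option String) : Bool := c == none || c == some ""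

-- A's inner `while normalized and normalized[-1] in ("", None): normalized.pop()`
def popTrailing (l : List (Option String)) : List (Option String) :=
  match h : l.getLast? with
  | some c => if isEmptyCell c then popTrailing l.dropLast else l
  | none => l
termination_by l.length
decreasing_by
  have hne : l ≠ [] := by intro e; simp [e] at h
  have := List.length_pos_iff.mpr hne
  simp [List.length_dropLast]; omega

-- `any(value not in ("", None) for value in normalized)`
def anyNonempty (r : List (Option String)) : Bool := r.any (fun v => !isEmptyCell v)

-- the `for index, row in enumerate(rows)` loop of A, carrying (index, trimmed, last_nonempty_index)
def loopA (rows : List (List (Option String))) (idx : Nat)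
    (trimmed : List (List (Option String))) (lni : Int) :
    List (List (Option String)) × Int :=
  match rows with
  | [] => (trimmed, lni)
  | r :: rest =>
    let normalized := popTrailing r
    loopA rest (idx + 1) (trimmed ++ [normalized])
      (if anyNonempty normalized then (idx : Int) else lni)

def trim_empty_rows_py (rows : List (List (Option String))) : List (List (Option String)) :=
  let st := loopA rows 0 [] (-1)
  if st.2 < 0 then [] else st.1.take (st.2 + 1).toNat

-- ===== PORT B =====
-- `v == "" or v is None`
def blankCell (c : Option String) : Bool := c == none || c == some ""

-- one row of B: reverse, drop the blank prefix (the `k` index loop), reverse back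
def trimRowB (r : List (Option String)) : List (Option String) :=
  ((r.reverse).dropWhile blankCell).reverse

def trim_empty_rows_py_alt (rows : List (List (Option String))) : List (List (Option String)) :=
  -- the `cut` decrement loop: rows[:cut] = rows minus its trailing all-blank rows
  let kept := ((rows.reverse).dropWhile (fun r => r.all blankCell)).reverse
  kept.map trimRowB

-- ===== PRECONDITION & SPEC =====
def Spec_trim_empty_rows_py (rows : List (List (Option String))) (out : List (List (Option String))) : Prop := out = trim_empty_rows_py_alt rows
instance (rows : List (List (Option String))) (out : List (List (Option String))) : Decidable (Spec_trim_empty_rows_py rows out) := by unfold Spec_trim_empty_rows_py; infer_instance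

-- ===== CLAIM (what is proved, stated in full; the proofs are below) =====
def Claim_equal_trim_empty_rows_py : Prop := ∀ (rows : List (List (Option String))), Dom_trim_empty_rows_py rows → Spec_trim_empty_rows_py rows (trim_empty_rows_py rows)

-- ===== LEMMAS AND PROOFS =====

-- generic "pop trailing" used only by the proofs, to relate the two ports
def popT {α : Type} (p : α → Bool) (l : List α) : List α :=
  match h : l.getLast? with
  | some c => if p c then popT p l.dropLast else l
  | none => l
termination_by l.length
decreasing_by
  have hne : l ≠ [] := by intro e; simp [e] at h
  have := List.length_pos_iff.mpr hne
  simp [List.length_dropLast]; omega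

theorem popT_nil {α : Type} (p : α → Bool) : popT p [] = [] := by
  rw [popT]; rfl

theorem popT_concat {α : Type} (p : α → Bool) (l : List α) (a : α) :
    popT p (l ++ [a]) = if p a then popT p l else l ++ [a] := by
  rw [popT]
  split
  · next c heq =>
      have hc : c = a := by
        rw [List.getLast?_concat] at heq
        exact (Option.some.injEq _ _ ▸ heq).symm
      subst hc
      rw [List.dropLast_concat]
  · next heq =>
      rw [List.getLast?_concat] at heq
      simp at heq

theorem popT_eq_revDrop {α : Type} (p : α → Bool) (l : List α) :
    popT p l = ((l.reverse).dropWhile p).reverse := by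
  induction l using List.reverseRecOn with
  | nil => simp [popT_nil]
  | append_singleton l a ih =>
    rw [popT_concat, List.reverse_append]
    simp only [List.reverse_singleton, List.singleton_append, List.dropWhile_cons]
    by_cases hp : p a
    · simp [hp, ih]
    · simp [hp]

theorem popTrailing_eq_popT (r : List (Option String)) :
    popTrailing r = popT isEmptyCell r := by
  induction r using List.reverseRecOn with
  | nil => rw [popTrailing, popT_nil]; rfl
  | append_singleton l a ih =>
    rw [popT_concat, popTrailing]
    split
    · next c heq =>
        have hc : c = a := by
          rw [List.getLast?_concat] at heq
          exact (Option.some.injEq _ _ ▸ heq).symm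
        subst hc
        rw [List.dropLast_concat]
        split_ifs with h
        · exact ih
        · rfl
    · next heq =>
        rw [List.getLast?_concat] at heq
        simp at heq

theorem popT_last {α : Type} (p : α → Bool) (l : List α) (c : α)
    (h : (popT p l).getLast? = some c) : p c = false := by
  induction l using List.reverseRecOn with
  | nil => rw [popT_nil] at h; simp at h
  | append_singleton l a ih =>
    rw [popT_concat] at h
    by_cases hp : p a
    · simp [hp] at h; exact ih h
    · simp [hp] at h
      subst h; simpa using hp

theorem anyNonempty_popT (r : List (Option String)) :
    anyNonempty (popT isEmptyCell r) = !(popT isEmptyCell r).isEmpty := by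
  cases h : (popT isEmptyCell r).getLast? with
  | none =>
    have : popT isEmptyCell r = [] := List.getLast?_eq_none_iff.mp h
    simp [anyNonempty, this]
  | some c =>
    have hc : isEmptyCell c = false := popT_last _ _ _ h
    have hmem : c ∈ popT isEmptyCell r := List.mem_of_getLast? h
    have hne : popT isEmptyCell r ≠ [] := by
      intro e; rw [e] at h; simp at h
    have he : (popT isEmptyCell r).isEmpty = false := by simp [hne]
    rw [he]
    simp only [anyNonempty, Bool.not_false, List.any_eq_true]
    exact ⟨c, hmem, by simp [hc]⟩

-- the last-nonempty-index computation, abstracted to the trimmed rows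
def li (ts : List (List (Option String))) (idx : Nat) (lni : Int) : Int :=
  match ts with
  | [] => lni
  | t :: rest => li rest (idx + 1) (if !t.isEmpty then (idx : Int) else lni)

theorem loopA_eq (rows : List (List (Option String))) (idx : Nat)
    (acc : List (List (Option String))) (lni : Int) :
    loopA rows idx acc lni =
      (acc ++ rows.map (popT isEmptyCell), li (rows.map (popT isEmptyCell)) idx lni) := by
  induction rows generalizing idx acc lni with
  | nil => simp [loopA, li]
  | cons r rest ih =>
    simp only [loopA, List.map_cons, li, ih, popTrailing_eq_popT, anyNonempty_popT,
      List.append_assoc, List.singleton_append]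

theorem li_concat (ts : List (List (Option String))) (t : List (Option String))
    (idx : Nat) (lni : Int) :
    li (ts ++ [t]) idx lni =
      if !t.isEmpty then ((idx + ts.length : Nat) : Int) else li ts idx lni := by
  induction ts generalizing idx lni with
  | nil => simp [li]
  | cons x rest ih =>
    simp only [List.cons_append, li, ih, List.length_cons]
    split_ifs
    all_goals first
      | rfl
      | (congr 1; omega)

theorem li_lt (ts : List (List (Option String))) (idx : Nat) (lni : Int)
    (h : lni < idx) : li ts idx lni < idx + ts.length := by
  induction ts generalizing idx lni with
  | nil => simpa [li] using h
  | cons t rest ih =>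
    simp only [li, List.length_cons]
    have : (if !t.isEmpty then (idx : Int) else lni) < idx + 1 := by
      split_ifs <;> omega
    have := ih (idx + 1) _ this
    push_cast at this ⊢
    omega

theorem main_generic (ts : List (List (Option String))) :
    (if li ts 0 (-1) < 0 then [] else ts.take (li ts 0 (-1) + 1).toNat) =
      popT (fun r => r.isEmpty) ts := by
  induction ts using List.reverseRecOn with
  | nil => simp [li, popT_nil]
  | append_singleton ts t ih =>
    rw [popT_concat, li_concat]
    by_cases ht : t.isEmpty
    · have hnc : ¬ ((!t.isEmpty) = true) := by simp [ht]
      have hp2 : ((fun r : List (Option String) => r.isEmpty) t = true) := by simpa using ht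
      rw [if_neg hnc, if_pos hp2, ← ih]
      have hk : li ts 0 (-1) < (ts.length : Int) := by
        simpa using li_lt ts 0 (-1) (by omega)
      split_ifs with h
      · rfl
      · rw [List.take_append_of_le_length (by omega)]
    · have ht' : t.isEmpty = false := eq_false_of_ne_true ht
      have hc : ((!t.isEmpty) = true) := by simp [ht']
      have hn2 : ¬ ((fun r : List (Option String) => r.isEmpty) t = true) := by simpa using ht
      rw [if_pos hc, if_neg hn2]
      rw [if_neg (show ¬ (((0 + ts.length : Nat) : Int) < 0) by push_cast; omega)]
      rw [List.take_of_length_le (by simp [List.length_append])]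

theorem allBlank_iff_trim_empty (r : List (Option String)) :
    r.all blankCell = (popT isEmptyCell r).isEmpty := by
  rw [popT_eq_revDrop]
  have hcell : isEmptyCell = blankCell := rfl
  rw [hcell, Bool.eq_iff_iff]
  simp [List.isEmpty_iff, List.dropWhile_eq_nil_iff, List.all_eq_true]

theorem alt_eq_popT (rows : List (List (Option String))) :
    trim_empty_rows_py_alt rows =
      popT (fun r => r.isEmpty) (rows.map (popT isEmptyCell)) := by
  have htrim : trimRowB = popT isEmptyCell := by
    funext r; rw [trimRowB, popT_eq_revDrop]; rfl
  have hpred : ((fun r : List (Option String) => r.isEmpty) ∘ popT isEmptyCell)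
      = fun r => r.all blankCell := by
    funext r
    simp only [Function.comp]
    rw [allBlank_iff_trim_empty]
  unfold trim_empty_rows_py_alt
  rw [popT_eq_revDrop, ← List.map_reverse, List.dropWhile_map, hpred, htrim, List.map_reverse]

-- ===== VERDICT (by name: the statement is the Claim_ definition above) =====
theorem trim_empty_rows_py_spec : Claim_equal_trim_empty_rows_py := by
  intro rows _
  unfold Spec_trim_empty_rows_py trim_empty_rows_py
  rw [loopA_eq, alt_eq_popT]
  simpa using main_generic (rows.map (popT isEmptyCell))
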